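-- pv_equiv track=rewrite | github.com/KipEnyan/PokemonTypeChecker | PokemonTypeChecker.py | calculateTypeLost
-- ===== SOURCE A (Python) =====
-- def calculateTypeLost(mostRedundant, strongTo):
--     '''Returns a dict of the types to remove and what coverage will be lost'''
--     lostTypes = {}
--     for aRedundant in mostRedundant:
--         for key, value in strongTo.items():
--             if aRedundant in value and len(value) == 1:
--                 if aRedundant in lostTypes:
--                     lostTypes[aRedundant].append(key)
--                 else:
--                     lostTypes[aRedundant] = [key]
--         if not aRedundant in lostTypes:
--             lostTypes[aRedundant] = []
--
--     return lostTypes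
-- ===== SOURCE B (Python) =====
-- def calculateTypeLost(mostRedundant, strongTo):
--     '''Returns a dict of the types to remove and what coverage will be lost'''
--     index = {}
--     for key, value in strongTo.items():
--         if len(value) == 1:
--             index.setdefault(value[0], []).append(key)
--     lost = {}
--     for aRedundant in mostRedundant:
--         lost[aRedundant] = lost.get(aRedundant, []) + index.get(aRedundant, [])
--     return lost
-- ===== Notes on version B (the rewrite author's own statement) =====
-- stated objective: faster
-- what changed: B builds a type->keys index over the singleton-coverage entries of strongTo in one pass, then answers each redundant type by a single dict lookup (accumulating on repeats) instead of rescanning all of strongTo for every redundant type.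
import Mathlib
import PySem

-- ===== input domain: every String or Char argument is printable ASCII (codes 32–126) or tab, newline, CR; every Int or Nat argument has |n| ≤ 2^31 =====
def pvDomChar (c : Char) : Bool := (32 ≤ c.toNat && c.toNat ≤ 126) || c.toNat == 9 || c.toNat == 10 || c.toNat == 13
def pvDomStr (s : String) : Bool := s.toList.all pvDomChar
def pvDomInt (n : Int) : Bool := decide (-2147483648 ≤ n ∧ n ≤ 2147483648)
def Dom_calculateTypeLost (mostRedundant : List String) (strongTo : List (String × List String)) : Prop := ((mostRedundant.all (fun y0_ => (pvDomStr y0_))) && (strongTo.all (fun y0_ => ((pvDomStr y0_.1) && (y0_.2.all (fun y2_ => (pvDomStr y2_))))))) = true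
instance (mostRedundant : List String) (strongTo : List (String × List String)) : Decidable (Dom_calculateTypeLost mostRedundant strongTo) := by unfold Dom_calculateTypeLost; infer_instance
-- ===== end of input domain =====

-- B replaces A's per-redundant rescan of strongTo by a one-pass singleton-coverage index plus a lookup per redundant type (an asymptotic change, O(R*S) -> O(R+S)).

-- ===== PORT A =====
def calculateTypeLost (mostRedundant : List String) (strongTo : List (String × List String)) : List (String × List String) :=
  (mostRedundant.foldl (fun lostTypes aRedundant =>
      let lostTypes2 := strongTo.foldl (fun lostTypes kv =>
          if kv.2.contains aRedundant && kv.2.length == 1 then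
            if lostTypes.contains aRedundant then
              lostTypes.modify aRedundant [] (fun l => l ++ [kv.1])
            else
              lostTypes.insert aRedundant [kv.1]
          else lostTypes) lostTypes
      if !(lostTypes2.contains aRedundant) then lostTypes2.insert aRedundant [] else lostTypes2)
    PySem.Dict.empty).items

-- ===== PORT B =====
-- 'value[0]' is ported as '.headD ""', exact under the guard 'len(value) == 1'.
def calculateTypeLost_alt (mostRedundant : List String) (strongTo : List (String × List String)) : List (String × List String) :=
  let index := strongTo.foldl (fun index kv =>
      if kv.2.length == 1 then index.modify (kv.2.headD "") [] (fun l => l ++ [kv.1]) else index)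
    PySem.Dict.empty
  (mostRedundant.foldl (fun lost aRedundant =>
      lost.insert aRedundant (lost.getD aRedundant [] ++ index.getD aRedundant []))
    PySem.Dict.empty).items

-- ===== PRECONDITION & SPEC =====
def Spec_calculateTypeLost (mostRedundant : List String) (strongTo : List (String × List String)) (out : List (String × List String)) : Prop := out = calculateTypeLost_alt mostRedundant strongTo
instance (mostRedundant : List String) (strongTo : List (String × List String)) (out : List (String × List String)) : Decidable (Spec_calculateTypeLost mostRedundant strongTo out) := by unfold Spec_calculateTypeLost; infer_instance

-- ===== CLAIM (what is proved, stated in full; the proofs are below) =====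
def Claim_equal_calculateTypeLost : Prop := ∀ (mostRedundant : List String) (strongTo : List (String × List String)), Dom_calculateTypeLost mostRedundant strongTo → Spec_calculateTypeLost mostRedundant strongTo (calculateTypeLost mostRedundant strongTo)

-- ===== LEMMAS AND PROOFS =====

-- the keys of strongTo whose coverage list is exactly the singleton [r], in order
def pvKeysFor (r : String) (st : List (String × List String)) : List String :=
  (st.filter (fun kv => kv.2.contains r && kv.2.length == 1)).map Prod.fst

lemma pv_idx_getD (r : String) : ∀ (st : List (String × List String)) (idx : PySem.Dict String (List String)),
    (st.foldl (fun index kv =>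
        if kv.2.length == 1 then index.modify (kv.2.headD "") [] (fun l => l ++ [kv.1]) else index) idx).getD r []
    = idx.getD r [] ++ pvKeysFor r st := by
  intro st
  induction st with
  | nil => intro idx; simp [pvKeysFor]
  | cons kv t ih =>
    intro idx
    obtain ⟨k, v⟩ := kv
    cases v with
    | nil => simpa [pvKeysFor] using ih idx
    | cons a v' =>
      cases v' with
      | cons b v'' => simpa [pvKeysFor, List.filter_cons] using ih idx
      | nil =>
        simp only [List.foldl_cons]
        rw [if_pos (by simp), ih, List.headD_cons]
        by_cases hra : r = a
        · subst hra
          rw [PySem.Dict.getD_modify_self]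
          simp [pvKeysFor]
        · rw [PySem.Dict.getD_modify_of_ne _ _ _ hra]
          simp [pvKeysFor, hra]

lemma pv_branch (d : PySem.Dict String (List String)) (r k : String) :
    (if d.contains r then d.modify r [] (fun l => l ++ [k]) else d.insert r [k])
      = d.insert r (d.getD r [] ++ [k]) := by
  by_cases h : d.contains r = true
  · simp [h, PySem.Dict.modify]
  · have h' : d.contains r = false := by simpa using h
    rw [if_neg (by simp [h']), PySem.Dict.getD_of_not_contains _ _ h']
    rfl

lemma pv_innerA (r : String) : ∀ (st : List (String × List String)) (lost : PySem.Dict String (List String)),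
    st.foldl (fun lostTypes kv =>
        if kv.2.contains r && kv.2.length == 1 then
          if lostTypes.contains r then lostTypes.modify r [] (fun l => l ++ [kv.1])
          else lostTypes.insert r [kv.1]
        else lostTypes) lost
    = (pvKeysFor r st).foldl (fun d k => d.insert r (d.getD r [] ++ [k])) lost := by
  intro st
  induction st with
  | nil => intro lost; simp [pvKeysFor]
  | cons kv t ih =>
    intro lost
    by_cases h : (kv.2.contains r && kv.2.length == 1) = true
    · have hm : r ∈ kv.2 ∧ kv.2.length = 1 := by simpa using h
      have hk : pvKeysFor r (kv :: t) = kv.1 :: pvKeysFor r t := by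
        simp [pvKeysFor, hm.1, hm.2]
      rw [hk, List.foldl_cons, List.foldl_cons, if_pos h, pv_branch]
      exact ih _
    · have h' : (kv.2.contains r && kv.2.length == 1) = false := by simpa using h
      have hm : ¬(r ∈ kv.2 ∧ kv.2.length = 1) := by simpa using h
      have hk : pvKeysFor r (kv :: t) = pvKeysFor r t := by
        simp only [pvKeysFor, List.filter_cons, h', Bool.false_eq_true, if_false]
      rw [hk, List.foldl_cons, if_neg h]
      exact ih lost

lemma pv_ksfold (r : String) : ∀ (ks : List String) (lost : PySem.Dict String (List String)), ks ≠ [] →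
    ks.foldl (fun d k => d.insert r (d.getD r [] ++ [k])) lost
      = lost.insert r (lost.getD r [] ++ ks) := by
  intro ks
  induction ks with
  | nil => intro lost h; exact absurd rfl h
  | cons k t ih =>
    intro lost _
    cases t with
    | nil => simp
    | cons k2 t2 =>
      rw [List.foldl_cons, ih _ (by simp), PySem.Dict.getD_insert_self, PySem.Dict.insert_insert_self,
        List.append_assoc]
      rfl

lemma pv_list_fix (r : String) : ∀ (l : List (String × List String)) (w : String × List String),
    (l.map Prod.fst).Nodup → l.find? (fun q => q.1 == r) = some w →
    l.map (fun p => if p.1 == r then (r, w.2) else p) = l := by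
  intro l
  induction l with
  | nil => intro w _ hf; simp at hf
  | cons q t ih =>
    intro w hnd hf
    by_cases hq : q.1 = r
    · rw [List.find?_cons_of_pos (by simpa using hq)] at hf
      obtain rfl : q = w := by simpa using hf
      rw [List.map_cons, if_pos (show (q.1 == r) = true by simpa using hq)]
      have ht : ∀ p ∈ t, ¬(p.1 = r) := by
        intro p hp hpr
        have : q.1 ∈ t.map Prod.fst := by
          rw [hq, ← hpr]; exact List.mem_map_of_mem hp
        exact (List.nodup_cons.mp (by simpa using hnd)).1 this
      have : t.map (fun p => if p.1 == r then (r, q.2) else p) = t := by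
        conv_rhs => rw [← List.map_id t]
        exact List.map_congr_left (fun p hp => by simp [ht p hp])
      rw [this]
      simp [← hq]
    · rw [List.find?_cons_of_neg (by simpa using hq)] at hf
      rw [List.map_cons, if_neg (show ¬((q.1 == r) = true) by simpa using hq),
        ih w (List.nodup_cons.mp (by simpa using hnd)).2 hf]

lemma pv_insert_self (d : PySem.Dict String (List String)) (r : String)
    (hnd : d.keys.Nodup) (h : d.contains r = true) :
    d.insert r (d.getD r []) = d := by
  obtain ⟨l⟩ := d
  obtain ⟨w, hw⟩ : ∃ w, l.find? (fun q => q.1 == r) = some w := by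
    simp only [PySem.Dict.contains] at h
    obtain ⟨p, hp, hpr⟩ := List.any_eq_true.mp h
    exact Option.isSome_iff_exists.mp (List.find?_isSome.mpr ⟨p, hp, hpr⟩)
  have hval : (PySem.Dict.mk l).getD r [] = w.2 := by
    simp [PySem.Dict.getD, PySem.Dict.get?, hw]
  rw [hval]
  show PySem.Dict.insert _ r w.2 = _
  simp only [PySem.Dict.insert, h, if_pos]
  apply PySem.Dict.ext
  exact pv_list_fix r l w (by simpa [PySem.Dict.keys] using hnd) hw

lemma pv_stepA (st : List (String × List String)) (lost : PySem.Dict String (List String)) (r : String)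
    (hnd : lost.keys.Nodup) :
    (let lostTypes2 := st.foldl (fun lostTypes kv =>
        if kv.2.contains r && kv.2.length == 1 then
          if lostTypes.contains r then lostTypes.modify r [] (fun l => l ++ [kv.1])
          else lostTypes.insert r [kv.1]
        else lostTypes) lost
     if !(lostTypes2.contains r) then lostTypes2.insert r [] else lostTypes2)
    = lost.insert r (lost.getD r [] ++ pvKeysFor r st) := by
  simp only [pv_innerA r st lost]
  by_cases hks : pvKeysFor r st = []
  · rw [hks]
    simp only [List.foldl_nil, List.append_nil]
    by_cases hc : lost.contains r = true
    · simp [hc, pv_insert_self lost r hnd hc]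
    · have hc' : lost.contains r = false := by simpa using hc
      simp [hc', PySem.Dict.getD_of_not_contains _ _ hc']
  · rw [pv_ksfold r _ lost hks]
    simp [PySem.Dict.contains_insert_self]

lemma pv_main (st : List (String × List String)) :
    ∀ (mr : List String) (lost : PySem.Dict String (List String)), lost.keys.Nodup →
    mr.foldl (fun lostTypes aRedundant =>
      let lostTypes2 := st.foldl (fun lostTypes kv =>
          if kv.2.contains aRedundant && kv.2.length == 1 then
            if lostTypes.contains aRedundant then
              lostTypes.modify aRedundant [] (fun l => l ++ [kv.1])
            else
              lostTypes.insert aRedundant [kv.1]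
          else lostTypes) lostTypes
      if !(lostTypes2.contains aRedundant) then lostTypes2.insert aRedundant [] else lostTypes2) lost
    = mr.foldl (fun lost r => lost.insert r (lost.getD r [] ++ pvKeysFor r st)) lost := by
  intro mr
  induction mr with
  | nil => intro lost _; rfl
  | cons r t ih =>
    intro lost hnd
    rw [List.foldl_cons, List.foldl_cons, pv_stepA st lost r hnd]
    exact ih _ (PySem.Dict.nodup_keys_insert _ _ _ hnd)

-- ===== VERDICT (by name: the statement is the Claim_ definition above) =====
theorem calculateTypeLost_spec : Claim_equal_calculateTypeLost := by
  intro mr st _hdom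
  unfold Spec_calculateTypeLost calculateTypeLost calculateTypeLost_alt
  have hfun : (fun (lost : PySem.Dict String (List String)) (r : String) =>
      lost.insert r (lost.getD r [] ++
        (st.foldl (fun index kv =>
          if kv.2.length == 1 then index.modify (kv.2.headD "") [] (fun l => l ++ [kv.1]) else index)
          PySem.Dict.empty).getD r []))
      = (fun lost r => lost.insert r (lost.getD r [] ++ pvKeysFor r st)) := by
    funext lost r
    rw [pv_idx_getD r st PySem.Dict.empty]
    simp [PySem.Dict.getD_empty]
  simp only []
  rw [pv_main st mr PySem.Dict.empty (by simp [PySem.Dict.keys, PySem.Dict.empty])]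
  rw [hfun]
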